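-- pv_equiv track=rewrite | github.com/RocketryVT/launch-control-gui | rvtr.py | xorchecksum
-- ===== SOURCE A (Python) =====
-- def xorchecksum(packet):
--     c0 = 0
--     c1 = 0
--     i = 0
--     while i < len(packet) - 1:
--         c0 ^= packet[i]
--         c1 ^= packet[i + 1]
--         i += 2
--     if i < len(packet):
--         c0 ^= packet[i]
--     return c0, c1
-- ===== SOURCE B (Python) =====
-- from functools import reduce
-- from operator import xor
--
-- def xorchecksum(packet):
--     return (reduce(xor, packet[0::2], 0), reduce(xor, packet[1::2], 0))
-- ===== Notes on version B (the rewrite author's own statement) =====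
-- stated objective: idiomatic
-- what changed: Replaces the index-stepping while loop with trailing odd-length special case by two independent XOR reductions (functools.reduce) over the even- and odd-index stride slices.
import Mathlib
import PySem

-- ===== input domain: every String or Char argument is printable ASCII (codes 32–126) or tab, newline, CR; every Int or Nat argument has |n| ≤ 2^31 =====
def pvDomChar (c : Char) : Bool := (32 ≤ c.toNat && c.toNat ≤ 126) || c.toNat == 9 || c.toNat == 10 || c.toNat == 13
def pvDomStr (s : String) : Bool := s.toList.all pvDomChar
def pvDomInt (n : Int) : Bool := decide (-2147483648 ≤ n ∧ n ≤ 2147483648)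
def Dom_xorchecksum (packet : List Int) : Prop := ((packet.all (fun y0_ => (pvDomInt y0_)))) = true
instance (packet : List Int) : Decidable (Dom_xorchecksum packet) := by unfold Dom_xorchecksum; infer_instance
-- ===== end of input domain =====

-- B replaces A's index-stepping while loop (with its trailing odd-length step) by two
-- independent XOR folds over the even- and odd-index stride-2 slices (idiomatic).


-- ===== PORT A =====
-- the while loop: 'while i < len(packet) - 1: c0 ^= packet[i]; c1 ^= packet[i+1]; i += 2'
-- followed by 'if i < len(packet): c0 ^= packet[i]'.  i+1 < packet.length is exactly the
-- Int condition i < len - 1 for a Nat index i; both indexings are in range, so pyGetD is exact.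
def xorchecksumLoop (packet : List Int) (c0 c1 : Int) (i : Nat) : Int × Int :=
  if i + 1 < packet.length then
    xorchecksumLoop packet
      (PySem.Int.bxor c0 (PySem.List.pyGetD packet (i : Int) 0))
      (PySem.Int.bxor c1 (PySem.List.pyGetD packet ((i : Int) + 1) 0))
      (i + 2)
  else if i < packet.length then
    (PySem.Int.bxor c0 (PySem.List.pyGetD packet (i : Int) 0), c1)
  else (c0, c1)
termination_by packet.length - i

def xorchecksum (packet : List Int) : Int × Int :=
  xorchecksumLoop packet 0 0 0

-- ===== PORT B =====
-- hand port of the step-2 slice packet[0::2] (PySem.List.slice has no step); exact on lists.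
def stride2 : List Int → List Int
  | [] => []
  | [x] => [x]
  | x :: _ :: t => x :: stride2 t

-- packet[1::2] = stride2 of packet[1:], i.e. of packet.tail
def xorchecksum_alt (packet : List Int) : Int × Int :=
  ((stride2 packet).foldl PySem.Int.bxor 0, (stride2 packet.tail).foldl PySem.Int.bxor 0)

-- ===== PRECONDITION & SPEC =====
def Spec_xorchecksum (packet : List Int) (out : Int × Int) : Prop := out = xorchecksum_alt packet
instance (packet : List Int) (out : Int × Int) : Decidable (Spec_xorchecksum packet out) := by unfold Spec_xorchecksum; infer_instance

-- ===== CLAIM (what is proved, stated in full; the proofs are below) =====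
def Claim_equal_xorchecksum : Prop := ∀ (packet : List Int), Dom_xorchecksum packet → Spec_xorchecksum packet (xorchecksum packet)

-- ===== LEMMAS AND PROOFS =====
theorem stride2_cons (x : Int) (t : List Int) : stride2 (x :: t) = x :: stride2 t.tail := by
  cases t <;> rfl

theorem xorchecksumLoop_drop (n : Nat) : ∀ (packet : List Int) (c0 c1 : Int) (i : Nat),
    packet.length - i ≤ n →
    xorchecksumLoop packet c0 c1 i =
      ((stride2 (packet.drop i)).foldl PySem.Int.bxor c0,
       (stride2 (packet.drop i).tail).foldl PySem.Int.bxor c1) := by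
  induction n with
  | zero =>
    intro packet c0 c1 i h
    have hi : packet.length ≤ i := by omega
    rw [xorchecksumLoop]
    simp [stride2, List.drop_eq_nil_of_le hi, if_neg (by omega : ¬ i + 1 < packet.length),
      if_neg (by omega : ¬ i < packet.length)]
  | succ n ih =>
    intro packet c0 c1 i h
    rw [xorchecksumLoop]
    by_cases h1 : i + 1 < packet.length
    · rw [if_pos h1, ih packet _ _ (i + 2) (by omega)]
      have hd : packet.drop i = packet[i] :: packet[i+1] :: packet.drop (i + 2) := by
        rw [List.drop_eq_getElem_cons (by omega), List.drop_eq_getElem_cons h1]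
      have hG0 : PySem.List.pyGetD packet (i : Int) 0 = packet[i] := by
        rw [PySem.List.pyGetD_natCast, List.getD_eq_getElem _ _ (by omega)]
      have hG1 : PySem.List.pyGetD packet ((i : Int) + 1) 0 = packet[i+1] := by
        have : ((i : Int) + 1) = ((i + 1 : Nat) : Int) := by push_cast; ring
        rw [this, PySem.List.pyGetD_natCast, List.getD_eq_getElem _ _ h1]
      rw [hG0, hG1, hd]
      simp only [stride2_cons, List.tail_cons, List.foldl_cons]
    · rw [if_neg h1]
      by_cases h2 : i < packet.length
      · rw [if_pos h2]
        have hd : packet.drop i = [packet[i]] := by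
          rw [List.drop_eq_getElem_cons h2, List.drop_eq_nil_of_le (by omega)]
        have hG0 : PySem.List.pyGetD packet (i : Int) 0 = packet[i] := by
          rw [PySem.List.pyGetD_natCast, List.getD_eq_getElem _ _ h2]
        rw [hd, hG0]
        simp [stride2]
      · rw [if_neg h2]
        simp [List.drop_eq_nil_of_le (by omega : packet.length ≤ i), stride2]

-- ===== VERDICT (by name: the statement is the Claim_ definition above) =====
theorem xorchecksum_spec : Claim_equal_xorchecksum := by
  intro packet _
  unfold Spec_xorchecksum xorchecksum xorchecksum_alt
  rw [xorchecksumLoop_drop packet.length packet 0 0 0 (by omega)]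
  simp
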